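-- pv_equiv track=rewrite | github.com/Vineyardcode/voynich_slop | scripts/phase73_abbreviation_model.py | syllabic_encode
-- ===== SOURCE A (Python) =====
-- VOWELS = set('aeiou')
--
-- CONSONANTS = set('bcdfghjklmnpqrstvwxyz')
--
-- def syllabify_latin(word):
--     """Simple Latin syllabification (approximate).
--     Rules: split before consonant+vowel sequences.
--     This is an approximation — real Latin syllabification has more rules."""
--     if len(word) <= 2:
--         return [word]
--
--     syllables = []
--     current = word[0]
--     for i in range(1, len(word)):
--         ch = word[i]
--         prev = word[i-1]
--         # Split before a consonant that precedes a vowel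
--         if (ch in CONSONANTS and i + 1 < len(word) and word[i+1] in VOWELS
--             and len(current) >= 1 and current[-1] in VOWELS):
--             syllables.append(current)
--             current = ch
--         else:
--             current += ch
--     if current:
--         syllables.append(current)
--     return syllables
--
-- def syllabic_encode(words, syl_map):
--     """Encode words using syllabic mapping. Preserves word boundaries."""
--     output = []
--     for word in words:
--         syls = syllabify_latin(word)
--         encoded = ''.join(syl_map.get(s, s) for s in syls)
--         if encoded:
--             output.append(encoded)
--     return output
-- ===== SOURCE B (Python) =====
-- VOWELS = set('aeiou')
--
-- CONSONANTS = set('bcdfghjklmnpqrstvwxyz')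
--
-- def _syllabify_latin(word):
--     """Syllabify by first computing the split points (VCV boundaries), then slicing."""
--     if len(word) <= 2:
--         return [word]
--     n = len(word)
--     cuts = [0] + [i for i in range(1, n - 1)
--                   if word[i-1] in VOWELS and word[i] in CONSONANTS and word[i+1] in VOWELS] + [n]
--     return [word[a:b] for a, b in zip(cuts, cuts[1:])]
--
-- def syllabic_encode(words, syl_map):
--     encoded = (''.join(syl_map.get(s, s) for s in _syllabify_latin(w)) for w in words)
--     return [e for e in encoded if e]
-- ===== Notes on version B (the rewrite author's own statement) =====
-- stated objective: alternative
-- what changed: syllabify_latin no longer grows a current-syllable string through a stateful scan; it computes the list of VCV boundary indices with a comprehension and slices the word at those cut points, and syllabic_encode becomes a map+filter comprehension instead of an accumulator loop.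
import Mathlib
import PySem

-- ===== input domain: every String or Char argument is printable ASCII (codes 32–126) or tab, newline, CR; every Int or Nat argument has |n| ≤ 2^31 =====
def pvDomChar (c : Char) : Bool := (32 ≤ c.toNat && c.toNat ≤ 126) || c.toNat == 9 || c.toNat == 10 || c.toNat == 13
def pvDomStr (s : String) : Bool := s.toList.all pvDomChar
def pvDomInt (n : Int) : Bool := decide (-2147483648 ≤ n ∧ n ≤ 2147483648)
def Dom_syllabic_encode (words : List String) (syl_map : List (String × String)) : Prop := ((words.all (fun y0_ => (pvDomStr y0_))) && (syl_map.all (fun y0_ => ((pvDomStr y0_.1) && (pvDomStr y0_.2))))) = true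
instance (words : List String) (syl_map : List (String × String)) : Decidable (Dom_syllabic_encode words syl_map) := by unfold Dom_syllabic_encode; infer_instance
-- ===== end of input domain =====

-- B replaces A's stateful current-syllable scan by computing the VCV cut indices and slicing; same cost (objective: alternative).

-- ===== PORT A =====
def pvVowels : List Char := PySem.Set.ofList "aeiou".toList
def pvConsonants : List Char := PySem.Set.ofList "bcdfghjklmnpqrstvwxyz".toList

-- the body of A's `for i in range(1, len(word))` loop, as structural recursion on the index
-- (w.getD i ' ' is word[i]; the loop index is always in range)
def pvSylLoopA (w : List Char) (i : Nat) (syls : List (List Char)) (cur : List Char) : List (List Char) :=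
  if i < w.length then
    -- ch := word[i] is inlined as w.getD i ' ' (always in range here)
    if pvConsonants.contains (w.getD i ' ') && decide (i + 1 < w.length) && pvVowels.contains (w.getD (i+1) ' ')
        && decide (1 ≤ cur.length) && pvVowels.contains (PySem.List.pyGetD cur (-1) ' ') then
      pvSylLoopA w (i+1) (syls ++ [cur]) [w.getD i ' ']
    else
      pvSylLoopA w (i+1) syls (cur ++ [w.getD i ' '])
  else
    if cur ≠ [] then syls ++ [cur] else syls
termination_by w.length - i

def syllabify_latin (word : String) : List String :=
  let w := word.toList
  if w.length ≤ 2 then [word]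
  else (pvSylLoopA w 1 [] [w.getD 0 ' ']).map String.mk

def syllabic_encode (words : List String) (syl_map : List (String × String)) : List String :=
  words.foldl (fun output word =>
    let syls := syllabify_latin word
    let encoded := PySem.Str.join "" (syls.map (fun s => (PySem.Dict.mk syl_map).getD s s))
    if encoded ≠ "" then output ++ [encoded] else output) []

-- ===== PORT B =====
def syllabify_latin_alt (word : String) : List String :=
  let w := word.toList
  let n := w.length
  if n ≤ 2 then [word]
  else
    let cuts : List Int :=
      (0 : Int) :: (PySem.List.pyRange 1 ((n : Int) - 1) 1).filter
        (fun i => pvVowels.contains (PySem.List.pyGetD w (i-1) ' ')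
          && pvConsonants.contains (PySem.List.pyGetD w i ' ')
          && pvVowels.contains (PySem.List.pyGetD w (i+1) ' ')) ++ [(n : Int)]
    (cuts.zip cuts.tail).map (fun p => String.mk (PySem.List.slice w (some p.1) (some p.2)))

def syllabic_encode_alt (words : List String) (syl_map : List (String × String)) : List String :=
  (words.map (fun word =>
    PySem.Str.join "" ((syllabify_latin_alt word).map (fun s => (PySem.Dict.mk syl_map).getD s s)))).filter
    (fun e => e ≠ "")

-- ===== PRECONDITION & SPEC =====
def Spec_syllabic_encode (words : List String) (syl_map : List (String × String)) (out : List String) : Prop := out = syllabic_encode_alt words syl_map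
instance (words : List String) (syl_map : List (String × String)) (out : List String) : Decidable (Spec_syllabic_encode words syl_map out) := by unfold Spec_syllabic_encode; infer_instance

-- ===== CLAIM (what is proved, stated in full; the proofs are below) =====
def Claim_equal_syllabic_encode : Prop := ∀ (words : List String) (syl_map : List (String × String)), Dom_syllabic_encode words syl_map → Spec_syllabic_encode words syl_map (syllabic_encode words syl_map)

-- ===== LEMMAS AND PROOFS =====

-- the slice of w between cut points a and b
def pvSeg (w : List Char) (a b : Nat) : List Char := (w.drop a).take (b - a)

-- VCV test at index i (i ≥ 1)
def pvVCV (w : List Char) (i : Nat) : Bool :=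
  pvVowels.contains (w.getD (i-1) ' ') && pvConsonants.contains (w.getD i ' ')
    && pvVowels.contains (w.getD (i+1) ' ')

-- cut points in [i, w.length - 2]
def pvCutsFrom (w : List Char) (i : Nat) : List Nat :=
  (List.range' i (w.length - 1 - i)).filter (pvVCV w)

def pvPairs (l : List Nat) : List (Nat × Nat) := l.zip l.tail

lemma pvSeg_length (w : List Char) (a b : Nat) (hb : b ≤ w.length) (hab : a ≤ b) :
    (pvSeg w a b).length = b - a := by
  simp [pvSeg]; omega

lemma pvSeg_ne_nil (w : List Char) (a b : Nat) (hb : b ≤ w.length) (hab : a < b) :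
    pvSeg w a b ≠ [] := by
  intro h
  have := pvSeg_length w a b hb (le_of_lt hab)
  rw [h] at this; simp at this; omega

lemma pvSeg_append (w : List Char) (k i : Nat) (hk : k ≤ i) (hi : i < w.length) :
    pvSeg w k (i+1) = pvSeg w k i ++ [w.getD i ' '] := by
  unfold pvSeg
  have h1 : i + 1 - k = (i - k) + 1 := by omega
  rw [h1, List.take_succ]
  congr 1
  have h2 : i - k < (w.drop k).length := by simp; omega
  have : (w.drop k)[i-k]? = some (w.getD i ' ') := by
    rw [List.getElem?_drop]
    have h3 : k + (i - k) = i := by omega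
    rw [h3, List.getElem?_eq_getElem hi, List.getD_eq_getElem w ' ' hi]
  simp [this]

lemma pvSeg_last (w : List Char) (k i : Nat) (hk : k < i) (hi : i ≤ w.length) :
    PySem.List.pyGetD (pvSeg w k i) (-1) ' ' = w.getD (i-1) ' ' := by
  have hne : pvSeg w k i ≠ [] := pvSeg_ne_nil w k i hi hk
  rw [PySem.List.pyGetD_neg_one _ _ hne]
  have hlen : (pvSeg w k i).length = i - k := pvSeg_length w k i hi (le_of_lt hk)
  have h3 : i - 1 < w.length := by omega
  have hsome : (pvSeg w k i).getLast? = some (w.getD (i-1) ' ') := by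
    rw [List.getLast?_eq_getElem?, hlen]
    show ((w.drop k).take (i-k))[i - k - 1]? = _
    rw [List.getElem?_take_of_lt (by omega), List.getElem?_drop]
    have h4 : k + (i - k - 1) = i - 1 := by omega
    rw [h4, List.getElem?_eq_getElem h3, List.getD_eq_getElem w ' ' h3]
  exact List.getLast_of_mem_getLast? hsome

lemma pvCutsFrom_ge (w : List Char) (i : Nat) (h : w.length - 1 ≤ i) : pvCutsFrom w i = [] := by
  unfold pvCutsFrom
  have : w.length - 1 - i = 0 := by omega
  simp [this]

lemma pvCutsFrom_cons (w : List Char) (i : Nat) (h : i < w.length - 1) :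
    pvCutsFrom w i = if pvVCV w i then i :: pvCutsFrom w (i+1) else pvCutsFrom w (i+1) := by
  unfold pvCutsFrom
  have h1 : w.length - 1 - i = (w.length - 1 - (i+1)) + 1 := by omega
  rw [h1, List.range'_succ, List.filter_cons]

-- the main loop invariant: A's loop from index i, with cur = w[k:i], produces the cut-point slices
lemma pvSylLoopA_eq (w : List Char) : ∀ (m i k : Nat) (syls : List (List Char)),
    i + m = w.length → 1 ≤ i → k < i →
    pvSylLoopA w i syls (pvSeg w k i) =
      syls ++ (pvPairs (k :: pvCutsFrom w i ++ [w.length])).map (fun p => pvSeg w p.1 p.2) := by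
  intro m
  induction m with
  | zero =>
    intro i k syls him h1 hk
    have hieq : i = w.length := by omega
    subst hieq
    unfold pvSylLoopA
    have hi : ¬ w.length < w.length := by omega
    have hne : pvSeg w k w.length ≠ [] := pvSeg_ne_nil w k w.length (le_refl _) hk
    rw [if_neg hi, if_pos hne, pvCutsFrom_ge w w.length (by omega)]
    simp [pvPairs]
  | succ m ih =>
    intro i k syls him h1 hk
    unfold pvSylLoopA
    have hi : i < w.length := by omega
    rw [if_pos hi]
    have hcur_len : 1 ≤ (pvSeg w k i).length := by
      rw [pvSeg_length w k i (by omega) (le_of_lt hk)]; omega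
    have hlast : PySem.List.pyGetD (pvSeg w k i) (-1) ' ' = w.getD (i-1) ' ' :=
      pvSeg_last w k i hk (by omega)
    by_cases hend : i + 1 < w.length
    · -- i ≤ length - 2 : A's condition equals pvVCV w i
      have hccond : (pvConsonants.contains (w.getD i ' ') && decide (i + 1 < w.length)
          && pvVowels.contains (w.getD (i+1) ' ') && decide (1 ≤ (pvSeg w k i).length)
          && pvVowels.contains (PySem.List.pyGetD (pvSeg w k i) (-1) ' ')) = pvVCV w i := by
        rw [hlast]
        simp only [pvVCV, decide_eq_true hend, decide_eq_true hcur_len]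
        cases pvVowels.contains (w.getD (i-1) ' ') <;>
          cases pvConsonants.contains (w.getD i ' ') <;>
          cases pvVowels.contains (w.getD (i+1) ' ') <;> simp
      rw [hccond, pvCutsFrom_cons w i (by omega)]
      by_cases hv : pvVCV w i
      · rw [if_pos hv, if_pos hv]
        have hseg1 : [w.getD i ' '] = pvSeg w i (i+1) := by
          have := pvSeg_append w i i (le_refl i) hi
          simpa [pvSeg] using this.symm
        rw [hseg1, ih (i+1) i (syls ++ [pvSeg w k i]) (by omega) (by omega) (by omega)]
        simp [pvPairs, List.append_assoc]
      · rw [if_neg hv, if_neg hv]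
        rw [← pvSeg_append w k i (le_of_lt hk) hi,
            ih (i+1) k syls (by omega) (by omega) (by omega)]
    · -- i = length - 1 : A's condition is false (i+1 < len fails) and i is past B's cut range
      have hccond : (pvConsonants.contains (w.getD i ' ') && decide (i + 1 < w.length)
          && pvVowels.contains (w.getD (i+1) ' ') && decide (1 ≤ (pvSeg w k i).length)
          && pvVowels.contains (PySem.List.pyGetD (pvSeg w k i) (-1) ' ')) = false := by
        simp [decide_eq_false hend]
      rw [hccond]
      simp only [Bool.false_eq_true, if_false]
      rw [← pvSeg_append w k i (le_of_lt hk) hi,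
          ih (i+1) k syls (by omega) (by omega) (by omega)]
      congr 3
      rw [pvCutsFrom_ge w i (by omega), pvCutsFrom_ge w (i+1) (by omega)]

-- B's cut list (Int) is the Nat cut list, cast
lemma pvCutsB_eq (w : List Char) (h : 2 < w.length) :
    (PySem.List.pyRange 1 ((w.length : Int) - 1) 1).filter
        (fun i => pvVowels.contains (PySem.List.pyGetD w (i-1) ' ')
          && pvConsonants.contains (PySem.List.pyGetD w i ' ')
          && pvVowels.contains (PySem.List.pyGetD w (i+1) ' '))
      = (pvCutsFrom w 1).map Int.ofNat := by
  rw [PySem.List.pyRange_one]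
  unfold pvCutsFrom
  rw [List.range'_eq_map_range]
  have h2 : ((w.length : Int) - 1 - 1).toNat = w.length - 2 := by omega
  have h3 : w.length - 1 - 1 = w.length - 2 := by omega
  rw [h2, h3]
  rw [List.filter_map, List.filter_map]
  simp only [List.map_map]
  have hpred : ∀ k : Nat,
      ((fun i => pvVowels.contains (PySem.List.pyGetD w (i-1) ' ')
        && pvConsonants.contains (PySem.List.pyGetD w i ' ')
        && pvVowels.contains (PySem.List.pyGetD w (i+1) ' ')) ∘ (fun k : Nat => ((1 : Int) + k))) k
        = (pvVCV w ∘ (fun k => 1 + k)) k := by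
    intro k
    have e1 : (1 : Int) + (k : Int) - 1 = ((k : Nat) : Int) := by ring
    have e2 : (1 : Int) + (k : Int) = (((1 + k : Nat) : Int)) := by push_cast; ring
    have e3 : (1 : Int) + (k : Int) + 1 = (((1 + k + 1 : Nat) : Int)) := by push_cast; ring
    simp only [Function.comp]
    rw [e1, e3, e2]
    simp only [PySem.List.pyGetD_natCast, pvVCV]
    have e4 : 1 + k - 1 = k := by omega
    rw [e4]
  rw [List.filter_congr (fun k _ => hpred k)]
  apply List.map_congr_left
  intro k _
  simp only [Function.comp, Int.ofNat_eq_natCast]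
  push_cast; ring

lemma pvSeg_zero_one (w : List Char) (h : w ≠ []) : pvSeg w 0 1 = [w.getD 0 ' '] := by
  have h1 : 0 < w.length := List.length_pos_of_ne_nil h
  have := pvSeg_append w 0 0 (le_refl 0) h1
  simpa [pvSeg] using this

lemma pvSyllabify_eq (word : String) : syllabify_latin word = syllabify_latin_alt word := by
  unfold syllabify_latin syllabify_latin_alt
  by_cases h : word.toList.length ≤ 2
  · rw [if_pos h, if_pos h]
  · rw [if_neg h, if_neg h]
    have h3 : 2 < word.toList.length := by omega
    have hne : word.toList ≠ [] := by intro hn; rw [hn] at h3; simp at h3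
    rw [← pvSeg_zero_one word.toList hne,
        pvSylLoopA_eq word.toList (word.toList.length - 1) 1 0 [] (by omega) (le_refl 1) (by omega),
        pvCutsB_eq word.toList h3]
    have hcast : (0 : Int) :: (pvCutsFrom word.toList 1).map Int.ofNat
          ++ [(word.toList.length : Int)]
        = ((0 :: pvCutsFrom word.toList 1 ++ [word.toList.length]).map Int.ofNat) := by
      simp
    rw [hcast]
    simp only [List.nil_append]
    rw [← List.map_tail, List.zip_map]
    rw [List.map_map, List.map_map]
    apply List.map_congr_left
    intro p _
    simp only [Function.comp, Prod.map, Int.ofNat_eq_natCast]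
    rw [PySem.List.slice_natCast]
    rfl

lemma pvEncodeFold (f : String → String) (ws : List String) (acc : List String) :
    ws.foldl (fun out w => if f w ≠ "" then out ++ [f w] else out) acc
      = acc ++ (ws.map f).filter (fun e => e ≠ "") := by
  induction ws generalizing acc with
  | nil => simp
  | cons w ws ih =>
    rw [List.foldl_cons]
    by_cases hw : f w = ""
    · rw [if_neg (by simp [hw]), ih, List.map_cons, List.filter_cons]
      simp [hw]
    · rw [if_pos hw, ih, List.map_cons, List.filter_cons]
      simp [hw]

-- ===== VERDICT (by name: the statement is the Claim_ definition above) =====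
theorem syllabic_encode_spec : Claim_equal_syllabic_encode := by
  intro words syl_map _
  unfold Spec_syllabic_encode syllabic_encode syllabic_encode_alt
  simp only [pvSyllabify_eq]
  rw [pvEncodeFold (fun word => PySem.Str.join ""
    ((syllabify_latin_alt word).map (fun s => (PySem.Dict.mk syl_map).getD s s))) words []]
  simp
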